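-- pv_equiv track=rewrite | github.com/BrianLusina/PythonSnips | algorithms/graphs/number_of_islands/__init__.py | num_of_distinct_islands
-- ===== SOURCE A (Python) =====
-- from typing import List, Tuple, Set, DefaultDict
--
-- def num_of_distinct_islands(grid: List[List[int]]) -> int:
--     """
--     Returns the number of distinct islands.
--     Args:
--         grid (List[List[int]]): grid represented as a 2D list where 1 represents land and 0 represents water.
--     Returns:
--         int: number of distinct islands.
--     """
--     if not grid:
--         return 0
--
--     num_rows = len(grid)
--     num_cols = len(grid[0])
--     path: List[str] = []
--     unique_islands: Set[str] = set()
--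
--     # A compact way to represent 4 directions
--     # next_dir=1: up (dx=-1, dy=0)
--     # next_dir=2: right (dx=0, dy=1)
--     # next_dir=3: down (dx=1, dy=0)
--     # next_dir=4: left (dx=0, dy=-1)
--     dirs: Tuple[int, int, int, int, int] = (-1, 0, 1, 0, -1)
--
--     def dfs(row: int, col: int, direction: int):
--         """
--         DFS approach to explore cells
--         Args:
--             row(int): row index
--             col(int): column index
--             direction(int): direction index taken to reach this cell(0 for starting pont, 1-4 for up/right/down/left
--         """
--         grid[row][col] = 0  # mark as visited
--         # record the direction we came from
--         path.append(str(direction))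
--
--         for next_dir in range(1, 5):
--             next_row, next_col = row + dirs[next_dir - 1], col + dirs[next_dir]
--             if (
--                 0 <= next_row < num_rows
--                 and 0 <= next_col < num_cols
--                 and grid[next_row][next_col] == 1
--             ):
--                 dfs(next_row, next_col, next_dir)
--
--         # Record backtracking (negative direction) to distinguish different shapes
--         path.append(str(-direction))
--
--     # We iterate through each cell in the grid
--     for row_idx, row in enumerate(grid):
--         for col_idx, cell in enumerate(row):
--             # Found a new island, cell with a value of 1
--             if cell:
--                 # when we find land, we star ta DFS from that cell to explore the entire land
--                 dfs(row_idx, col_idx, 0)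
--                 unique_islands.add("".join(path))
--                 path.clear()
--
--     return len(unique_islands)
-- ===== SOURCE B (Python) =====
-- def num_of_distinct_islands(grid):
--     """Iterative explicit-stack DFS emitting the same direction/backtrack signature.
--
--     Mutates grid in place (marks visited land 0) exactly like the original.
--     """
--     if not grid:
--         return 0
--     num_rows, num_cols = len(grid), len(grid[0])
--     dirs = ((-1, 0), (0, 1), (1, 0), (0, -1))  # up, right, down, left
--     shapes = set()
--     for r, row in enumerate(grid):
--         for c in range(len(row)):
--             if row[c]:
--                 grid[r][c] = 0
--                 tokens = ["0"]
--                 # frame: [row, col, incoming direction, next direction index to try]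
--                 stack = [[r, c, 0, 0]]
--                 while stack:
--                     cr, cc, d, i = stack[-1]
--                     if i >= 4:
--                         tokens.append(str(-d))
--                         stack.pop()
--                         continue
--                     stack[-1][3] = i + 1
--                     nr, nc = cr + dirs[i][0], cc + dirs[i][1]
--                     if 0 <= nr < num_rows and 0 <= nc < num_cols and grid[nr][nc] == 1:
--                         grid[nr][nc] = 0
--                         tokens.append(str(i + 1))
--                         stack.append([nr, nc, i + 1, 0])
--                 shapes.add("".join(tokens))
--     return len(shapes)
-- ===== Notes on version B (the rewrite author's own statement) =====
-- stated objective: alternative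
-- what changed: The recursive DFS with a shared mutable path list is replaced by an iterative explicit-stack DFS machine whose frames carry the next direction to try, emitting the same direction/backtrack signature tokens.
-- outside the precondition, e.g. on num_of_distinct_islands([[0, 0], [0]]): A returns 0, B returns 0
import Mathlib
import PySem

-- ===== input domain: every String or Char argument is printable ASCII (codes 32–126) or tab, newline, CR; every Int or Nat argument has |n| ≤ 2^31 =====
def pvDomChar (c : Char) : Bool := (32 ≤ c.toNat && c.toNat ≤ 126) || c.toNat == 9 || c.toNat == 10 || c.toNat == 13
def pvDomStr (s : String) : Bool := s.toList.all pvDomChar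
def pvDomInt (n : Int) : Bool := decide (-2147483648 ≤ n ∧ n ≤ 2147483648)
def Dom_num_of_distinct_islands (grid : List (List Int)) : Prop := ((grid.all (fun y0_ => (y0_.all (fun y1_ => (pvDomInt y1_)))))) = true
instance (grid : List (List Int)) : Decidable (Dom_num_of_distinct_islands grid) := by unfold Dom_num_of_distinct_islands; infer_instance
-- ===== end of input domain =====

-- B replaces A's recursive DFS by an explicit-stack iterative DFS emitting the same
-- direction/backtrack signature (alternative decomposition, same cost).  Both Pythons
-- mutate `grid` in place identically; the equivalence proved here is about the return value.

-- ===== PORT A =====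
-- shared cell primitives (both Pythons index the grid the same way, always under
-- `0 <= r` / `0 <= c` in-range guards, where these defaulted reads/writes are exact)
def pvCell (g : List (List Int)) (r c : Int) : Int :=
  ((PySem.List.pyGet? g r).bind (fun row => PySem.List.pyGet? row c)).getD 0

def pvSet (g : List (List Int)) (r c : Int) (v : Int) : List (List Int) :=
  g.set r.toNat ((g.getD r.toNat []).set c.toNat v)

-- number of nonzero cells: bounds the flood-fill recursion depth (fuel is a totality
-- device only; it is proved sufficient below, so no Python behaviour depends on it)
def pvNZ (g : List (List Int)) : Nat :=
  (g.map (fun row => row.countP (fun x => !(x == 0)))).sum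

-- dirs = (-1, 0, 1, 0, -1); dirs[i] for i in 0..4 (pyGet? is exact there)
def pvDirs (i : Int) : Int :=
  (PySem.List.pyGet? [(-1 : Int), 0, 1, 0, -1] i).getD 0

mutual
-- dfs(row, col, direction): mark visited, record str(direction), try dirs 1..4 in order,
-- record str(-direction); returns the new grid and the tokens appended to path
def pvDfsA (fuel : Nat) (R C : Int) (g : List (List Int)) (r c d : Int) :
    List (List Int) × List String :=
  match fuel with
  | 0 => (g, [])  -- unreachable: fuel exceeds the recursion depth at every call site
  | fuel + 1 =>
    let g1 := pvSet g r c 0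
    let e := pvExploreA fuel R C g1 r c 1
    (e.1, [PySem.Int.toStr d] ++ e.2 ++ [PySem.Int.toStr (-d)])

-- the `for next_dir in range(1, 5)` loop of dfs, from next_dir = nd
def pvExploreA (fuel : Nat) (R C : Int) (g : List (List Int)) (r c nd : Int) :
    List (List Int) × List String :=
  match fuel with
  | 0 => (g, [])  -- unreachable, as above
  | fuel + 1 =>
    if nd < 5 then
      if 0 ≤ r + pvDirs (nd - 1) ∧ r + pvDirs (nd - 1) < R ∧
          0 ≤ c + pvDirs nd ∧ c + pvDirs nd < C ∧
          pvCell g (r + pvDirs (nd - 1)) (c + pvDirs nd) = 1 then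
        let child := pvDfsA fuel R C g (r + pvDirs (nd - 1)) (c + pvDirs nd) nd
        let rest := pvExploreA fuel R C child.1 r c (nd + 1)
        (rest.1, child.2 ++ rest.2)
      else pvExploreA fuel R C g r c (nd + 1)
    else (g, [])
end

def num_of_distinct_islands (grid : List (List Int)) : Int :=
  if grid = [] then 0
  else
    let R : Int := grid.length
    let C : Int := (grid.headD []).length
    -- outer/inner loop over the (live, mutated) grid; row lengths are unchanged by pvSet
    let st :=
      (List.range grid.length).foldl
        (fun (st : List (List Int) × PySem.Set String) (rI : Nat) =>
          (List.range ((st.1.getD rI []).length)).foldl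
            (fun (st2 : List (List Int) × PySem.Set String) (cI : Nat) =>
              if pvCell st2.1 (rI : Int) (cI : Int) ≠ 0 then
                let res := pvDfsA (5 * pvNZ st2.1 + 5) R C st2.1 (rI : Int) (cI : Int) 0
                (res.1, PySem.Set.add st2.2 (PySem.Str.join "" res.2))
              else st2)
            st)
        (grid, PySem.Set.empty)
    PySem.Set.len st.2

-- ===== PORT B =====
-- DIRS = ((-1,0),(0,1),(1,0),(0,-1)); DIRS[i]
def pvDirPair (i : Int) : Int × Int :=
  (PySem.List.pyGet? [((-1 : Int), (0 : Int)), (0, 1), (1, 0), (0, -1)] i).getD (0, 0)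

-- the `while stack:` machine; frame = (row, col, incoming dir, next dir index to try)
def pvRunB (fuel : Nat) (R C : Int) (g : List (List Int))
    (stack : List (Int × Int × Int × Int)) (tokens : List String) :
    List (List Int) × List String :=
  match fuel with
  | 0 => (g, tokens)  -- unreachable: fuel exceeds the number of machine steps
  | fuel + 1 =>
    match stack with
    | [] => (g, tokens)
    | (cr, cc, d, i) :: rest =>
      if 4 ≤ i then
        pvRunB fuel R C g rest (tokens ++ [PySem.Int.toStr (-d)])
      else
        -- nr, nc = cr + dirs[i][0], cc + dirs[i][1] (inlined)
        if 0 ≤ cr + (pvDirPair i).1 ∧ cr + (pvDirPair i).1 < R ∧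
            0 ≤ cc + (pvDirPair i).2 ∧ cc + (pvDirPair i).2 < C ∧
            pvCell g (cr + (pvDirPair i).1) (cc + (pvDirPair i).2) = 1 then
          pvRunB fuel R C (pvSet g (cr + (pvDirPair i).1) (cc + (pvDirPair i).2) 0)
            ((cr + (pvDirPair i).1, cc + (pvDirPair i).2, i + 1, 0) :: (cr, cc, d, i + 1) :: rest)
            (tokens ++ [PySem.Int.toStr (i + 1)])
        else
          pvRunB fuel R C g ((cr, cc, d, i + 1) :: rest) tokens

def num_of_distinct_islands_alt (grid : List (List Int)) : Int :=
  if grid = [] then 0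
  else
    let R : Int := grid.length
    let C : Int := (grid.headD []).length
    let st :=
      (List.range grid.length).foldl
        (fun (st : List (List Int) × PySem.Set String) (rI : Nat) =>
          (List.range ((st.1.getD rI []).length)).foldl
            (fun (st2 : List (List Int) × PySem.Set String) (cI : Nat) =>
              if pvCell st2.1 (rI : Int) (cI : Int) ≠ 0 then
                let res := pvRunB (5 * pvNZ st2.1 + 5) R C
                  (pvSet st2.1 (rI : Int) (cI : Int) 0)
                  [((rI : Int), (cI : Int), 0, 0)] ["0"]
                (res.1, PySem.Set.add st2.2 (PySem.Str.join "" res.2))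
              else st2)
            st)
        (grid, PySem.Set.empty)
    PySem.Set.len st.2

-- ===== PRECONDITION & SPEC =====
-- Pre_ excludes only grids with a row shorter than row 0: there both Pythons' DFS bounds
-- (taken from row 0's length) can index past the end of such a row and raise IndexError.
def Pre_num_of_distinct_islands (grid : List (List Int)) : Prop :=
  ∀ row ∈ grid, (grid.headD []).length ≤ row.length
instance (grid : List (List Int)) : Decidable (Pre_num_of_distinct_islands grid) := by
  unfold Pre_num_of_distinct_islands; infer_instance

def pvWitness_num_of_distinct_islands : List (List Int) := [[1, 1, 0], [0, 0, 1]]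

def Spec_num_of_distinct_islands (grid : List (List Int)) (out : Int) : Prop := out = num_of_distinct_islands_alt grid
instance (grid : List (List Int)) (out : Int) : Decidable (Spec_num_of_distinct_islands grid out) := by unfold Spec_num_of_distinct_islands; infer_instance

-- ===== CLAIM (what is proved, stated in full; the proofs are below) =====
def Claim_equal_num_of_distinct_islands : Prop := ∀ (grid : List (List Int)), Dom_num_of_distinct_islands grid → Pre_num_of_distinct_islands grid → Spec_num_of_distinct_islands grid (num_of_distinct_islands grid)

-- ===== LEMMAS AND PROOFS =====

lemma pvRow_countP_set_lt (row : List Int) (k : Nat) (hk : k < row.length)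
    (h : row[k] ≠ 0) :
    (row.set k 0).countP (fun x => !(x == 0)) < row.countP (fun x => !(x == 0)) := by
  induction row generalizing k with
  | nil => simp at hk
  | cons a t ih =>
    cases k with
    | zero =>
      simp only [List.getElem_cons_zero] at h
      simp only [List.set_cons_zero, List.countP_cons]
      have ha : (!(a == 0)) = true := by simpa using h
      simp [ha]
    | succ k =>
      simp only [List.set_cons_succ, List.countP_cons]
      have := ih k (by simpa using hk) (by simpa using h)
      omega

lemma pvNZ_set_lt (g : List (List Int)) (r c : Int) (hr : 0 ≤ r) (hc : 0 ≤ c)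
    (h : pvCell g r c ≠ 0) : pvNZ (pvSet g r c 0) < pvNZ g := by
  unfold pvCell at h
  rw [PySem.List.pyGet?_of_nonneg g hr] at h
  rcases hrow : g[r.toNat]? with _ | row
  · rw [hrow] at h; simp at h
  · rw [hrow] at h
    simp only [Option.bind] at h
    rw [PySem.List.pyGet?_of_nonneg row hc] at h
    rcases hcell : row[c.toNat]? with _ | v
    · rw [hcell] at h; simp at h
    · rw [hcell] at h; simp only [Option.getD_some] at h
      have hrl : r.toNat < g.length := by
        by_contra hh
        rw [List.getElem?_eq_none (by omega)] at hrow; simp at hrow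
      have hcl : c.toNat < row.length := by
        by_contra hh
        rw [List.getElem?_eq_none (by omega)] at hcell; simp at hcell
      have hrow' : g[r.toNat] = row := by
        have := List.getElem?_eq_getElem hrl; rw [hrow] at this; exact (Option.some.inj this).symm
      have hcell' : row[c.toNat] = v := by
        have := List.getElem?_eq_getElem hcl; rw [hcell] at this; exact (Option.some.inj this).symm
      unfold pvNZ pvSet
      have hgd : g.getD r.toNat [] = row := by
        rw [List.getD_eq_getElem?_getD, hrow]; rfl
      rw [hgd]
      rw [List.map_set]
      have hmlen : r.toNat < (g.map (fun row => row.countP (fun x => !(x == 0)))).length := by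
        simpa using hrl
      have hgm : (g.map (fun row => row.countP (fun x => !(x == 0))))[r.toNat] =
          row.countP (fun x => !(x == 0)) := by
        simp [hrow']
      have hlt : (row.set c.toNat 0).countP (fun x => !(x == 0)) <
          row.countP (fun x => !(x == 0)) :=
        pvRow_countP_set_lt row c.toNat hcl (by rw [hcell']; exact h)
      -- compare sums elementwise via set
      have key : ∀ (l : List Nat) (n : Nat) (a : Nat) (hn : n < l.length),
          a < l[n] → (l.set n a).sum < l.sum := by
        intro l
        induction l with
        | nil => intro n a hn; simp at hn
        | cons x t ih =>
          intro n a hn ha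
          cases n with
          | zero => simp only [List.getElem_cons_zero] at ha
                    simp only [List.set_cons_zero, List.sum_cons]; omega
          | succ n =>
            simp only [List.getElem_cons_succ] at ha
            simp only [List.set_cons_succ, List.sum_cons]
            have := ih n a (by simpa using hn) ha
            omega
      exact key _ r.toNat _ hmlen (by rw [hgm]; exact hlt)

-- ---- well-founded (fuel-free) reference versions of both loops, used only in proofs ----
mutual
def pvDfsW (R C : Int) (g : List (List Int)) (r c d : Int)
    (hr : 0 ≤ r) (hc : 0 ≤ c) (h : pvCell g r c ≠ 0) :
    {p : List (List Int) × List String // pvNZ p.1 < pvNZ g} :=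
  let g1 := pvSet g r c 0
  let e := pvExploreW R C g1 r c 1
  ⟨(e.val.1, [PySem.Int.toStr d] ++ e.val.2 ++ [PySem.Int.toStr (-d)]),
    lt_of_le_of_lt e.property (pvNZ_set_lt g r c hr hc h)⟩
termination_by (pvNZ g, 0, 0)
decreasing_by
  · exact Prod.Lex.left _ _ (pvNZ_set_lt g r c hr hc h)

def pvExploreW (R C : Int) (g : List (List Int)) (r c nd : Int) :
    {p : List (List Int) × List String // pvNZ p.1 ≤ pvNZ g} :=
  if hnd : nd < 5 then
    if hg : 0 ≤ r + pvDirs (nd - 1) ∧ r + pvDirs (nd - 1) < R ∧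
        0 ≤ c + pvDirs nd ∧ c + pvDirs nd < C ∧
        pvCell g (r + pvDirs (nd - 1)) (c + pvDirs nd) = 1 then
      let child := pvDfsW R C g (r + pvDirs (nd - 1)) (c + pvDirs nd) nd hg.1 hg.2.2.1
        (by rw [hg.2.2.2.2]; decide)
      let rest := pvExploreW R C child.val.1 r c (nd + 1)
      ⟨(rest.val.1, child.val.2 ++ rest.val.2),
        le_trans rest.property (le_of_lt child.property)⟩
    else
      let rest := pvExploreW R C g r c (nd + 1)
      ⟨rest.val, rest.property⟩
  else ⟨(g, []), le_refl _⟩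
termination_by (pvNZ g, 1, (5 - nd).toNat)
decreasing_by
  · exact Prod.Lex.right _ (Prod.Lex.left _ _ (by omega))
  · exact Prod.Lex.left _ _ child.property
  · exact Prod.Lex.right _ (Prod.Lex.right _ (by omega))
end

def pvRunW (R C : Int) (g : List (List Int))
    (stack : List (Int × Int × Int × Int)) (tokens : List String) :
    List (List Int) × List String :=
  match stack with
  | [] => (g, tokens)
  | (cr, cc, d, i) :: rest =>
    if 4 ≤ i then
      pvRunW R C g rest (tokens ++ [PySem.Int.toStr (-d)])
    else
      if hg : 0 ≤ cr + (pvDirPair i).1 ∧ cr + (pvDirPair i).1 < R ∧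
          0 ≤ cc + (pvDirPair i).2 ∧ cc + (pvDirPair i).2 < C ∧
          pvCell g (cr + (pvDirPair i).1) (cc + (pvDirPair i).2) = 1 then
        pvRunW R C (pvSet g (cr + (pvDirPair i).1) (cc + (pvDirPair i).2) 0)
          ((cr + (pvDirPair i).1, cc + (pvDirPair i).2, i + 1, 0) :: (cr, cc, d, i + 1) :: rest)
          (tokens ++ [PySem.Int.toStr (i + 1)])
      else
        pvRunW R C g ((cr, cc, d, i + 1) :: rest) tokens
termination_by
  5 * pvNZ g + (stack.map (fun f => (5 - min f.2.2.2 4).toNat)).sum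
decreasing_by
  · simp only [List.map_cons, List.sum_cons]; omega
  · have := pvNZ_set_lt g (cr + (pvDirPair i).1) (cc + (pvDirPair i).2) hg.1 hg.2.2.1
      (by rw [hg.2.2.2.2]; decide)
    simp only [List.map_cons, List.sum_cons]
    omega
  · simp only [List.map_cons, List.sum_cons]; omega

lemma pvDfsW_val (R C : Int) (g : List (List Int)) (r c d : Int)
    (hr : 0 ≤ r) (hc : 0 ≤ c) (h : pvCell g r c ≠ 0) :
    (pvDfsW R C g r c d hr hc h).val =
      ((pvExploreW R C (pvSet g r c 0) r c 1).val.1,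
        [PySem.Int.toStr d] ++ (pvExploreW R C (pvSet g r c 0) r c 1).val.2 ++
          [PySem.Int.toStr (-d)]) := by
  rw [pvDfsW]

lemma pvExploreW_val_top (R C : Int) (g : List (List Int)) (r c nd : Int)
    (hnd : ¬ nd < 5) : (pvExploreW R C g r c nd).val = (g, []) := by
  rw [pvExploreW, dif_neg hnd]

lemma pvExploreW_val_neg (R C : Int) (g : List (List Int)) (r c nd : Int)
    (hnd : nd < 5)
    (hg : ¬ (0 ≤ r + pvDirs (nd - 1) ∧ r + pvDirs (nd - 1) < R ∧
      0 ≤ c + pvDirs nd ∧ c + pvDirs nd < C ∧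
      pvCell g (r + pvDirs (nd - 1)) (c + pvDirs nd) = 1)) :
    (pvExploreW R C g r c nd).val = (pvExploreW R C g r c (nd + 1)).val := by
  rw [pvExploreW, dif_pos hnd, dif_neg hg]

lemma pvExploreW_val_pos (R C : Int) (g : List (List Int)) (r c nd : Int)
    (hnd : nd < 5)
    (hg : 0 ≤ r + pvDirs (nd - 1) ∧ r + pvDirs (nd - 1) < R ∧
      0 ≤ c + pvDirs nd ∧ c + pvDirs nd < C ∧
      pvCell g (r + pvDirs (nd - 1)) (c + pvDirs nd) = 1) :
    (pvExploreW R C g r c nd).val =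
      ((pvExploreW R C
          (pvDfsW R C g (r + pvDirs (nd - 1)) (c + pvDirs nd) nd hg.1 hg.2.2.1
            (by rw [hg.2.2.2.2]; decide)).val.1 r c (nd + 1)).val.1,
        (pvDfsW R C g (r + pvDirs (nd - 1)) (c + pvDirs nd) nd hg.1 hg.2.2.1
            (by rw [hg.2.2.2.2]; decide)).val.2 ++
          (pvExploreW R C
            (pvDfsW R C g (r + pvDirs (nd - 1)) (c + pvDirs nd) nd hg.1 hg.2.2.1
              (by rw [hg.2.2.2.2]; decide)).val.1 r c (nd + 1)).val.2) := by
  rw [pvExploreW, dif_pos hnd, dif_pos hg]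

lemma pvDirPair_eq (nd : Int) (h1 : 1 ≤ nd) (h4 : nd ≤ 4) :
    pvDirPair (nd - 1) = (pvDirs (nd - 1), pvDirs nd) := by
  interval_cases nd <;> decide

-- the fuel-carrying ports compute exactly the reference versions once the fuel exceeds
-- the respective termination measure (it does at every call site of both ports)
theorem pv_fuel_A (f : Nat) :
    (∀ (R C : Int) (g : List (List Int)) (r c d : Int)
      (hr : 0 ≤ r) (hc : 0 ≤ c) (h : pvCell g r c ≠ 0), 5 * pvNZ g < f →
      pvDfsA f R C g r c d = (pvDfsW R C g r c d hr hc h).val) ∧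
    (∀ (R C : Int) (g : List (List Int)) (r c nd : Int), 1 ≤ nd → nd ≤ 5 →
      5 * pvNZ g + (5 - nd).toNat < f →
      pvExploreA f R C g r c nd = (pvExploreW R C g r c nd).val) := by
  induction f with
  | zero => exact ⟨fun _ _ _ _ _ _ _ _ _ hm => absurd hm (by omega),
      fun _ _ _ _ _ _ _ _ hm => absurd hm (by omega)⟩
  | succ f ih =>
    refine ⟨?_, ?_⟩
    · intro R C g r c d hr hc h hm
      have hlt := pvNZ_set_lt g r c hr hc h
      rw [pvDfsA]
      rw [ih.2 R C (pvSet g r c 0) r c 1 (by omega) (by omega) (by omega)]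
      rw [pvDfsW_val]
    · intro R C g r c nd h1 h5 hm
      rw [pvExploreA]
      by_cases h4 : nd < 5
      · rw [if_pos h4]
        by_cases hg : 0 ≤ r + pvDirs (nd - 1) ∧ r + pvDirs (nd - 1) < R ∧
            0 ≤ c + pvDirs nd ∧ c + pvDirs nd < C ∧
            pvCell g (r + pvDirs (nd - 1)) (c + pvDirs nd) = 1
        · rw [if_pos hg]
          dsimp only
          have hcell : pvCell g (r + pvDirs (nd - 1)) (c + pvDirs nd) ≠ 0 := by
            rw [hg.2.2.2.2]; decide
          rw [ih.1 R C g (r + pvDirs (nd - 1)) (c + pvDirs nd) nd hg.1 hg.2.2.1 hcell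
            (by omega)]
          have hchild := (pvDfsW R C g (r + pvDirs (nd - 1)) (c + pvDirs nd) nd hg.1
            hg.2.2.1 hcell).property
          rw [ih.2 R C (pvDfsW R C g (r + pvDirs (nd - 1)) (c + pvDirs nd) nd hg.1
            hg.2.2.1 hcell).val.1 r c (nd + 1) (by omega) (by omega) (by omega)]
          rw [pvExploreW_val_pos R C g r c nd h4 hg]
        · rw [if_neg hg]
          rw [ih.2 R C g r c (nd + 1) (by omega) (by omega) (by omega)]
          rw [pvExploreW_val_neg R C g r c nd h4 hg]
      · rw [if_neg h4]
        rw [pvExploreW_val_top R C g r c nd h4]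

theorem pv_fuel_B (f : Nat) :
    ∀ (R C : Int) (g : List (List Int)) (stack : List (Int × Int × Int × Int))
      (T : List String),
      5 * pvNZ g + (stack.map (fun fr => (5 - min fr.2.2.2 4).toNat)).sum < f →
      pvRunB f R C g stack T = pvRunW R C g stack T := by
  induction f with
  | zero => intro _ _ _ _ _ hm; exact absurd hm (by omega)
  | succ f ih =>
    intro R C g stack T hm
    match stack with
    | [] => rw [pvRunB, pvRunW]
    | (cr, cc, d, i) :: rest =>
      rw [pvRunB, pvRunW]
      simp only [List.map_cons, List.sum_cons] at hm
      by_cases hi : 4 ≤ i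
      · rw [if_pos hi, if_pos hi]
        exact ih R C g rest _ (by omega)
      · rw [if_neg hi, if_neg hi]
        by_cases hg : 0 ≤ cr + (pvDirPair i).1 ∧ cr + (pvDirPair i).1 < R ∧
            0 ≤ cc + (pvDirPair i).2 ∧ cc + (pvDirPair i).2 < C ∧
            pvCell g (cr + (pvDirPair i).1) (cc + (pvDirPair i).2) = 1
        · rw [if_pos hg, dif_pos hg]
          have hlt := pvNZ_set_lt g (cr + (pvDirPair i).1) (cc + (pvDirPair i).2)
            hg.1 hg.2.2.1 (by rw [hg.2.2.2.2]; decide)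
          refine ih R C _ _ _ ?_
          simp only [List.map_cons, List.sum_cons]
          omega
        · rw [if_neg hg, dif_neg hg]
          refine ih R C _ _ _ ?_
          simp only [List.map_cons, List.sum_cons]
          omega

-- the machine run with a fresh frame on top of the stack computes exactly what the
-- recursive dfs loop (pvExploreW) computes, then pops, emitting the backtrack token
theorem pv_sim_explore (n : Nat) :
    ∀ (g : List (List Int)) (R C r c d nd : Int)
      (rest : List (Int × Int × Int × Int)) (T : List String),
      1 ≤ nd → nd ≤ 5 → 5 * pvNZ g + (5 - nd).toNat ≤ n →
      pvRunW R C g ((r, c, d, nd - 1) :: rest) T =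
        pvRunW R C (pvExploreW R C g r c nd).val.1 rest
          ((T ++ (pvExploreW R C g r c nd).val.2) ++ [PySem.Int.toStr (-d)]) := by
  induction n with
  | zero =>
    intro g R C r c d nd rest T h1 h5 hm
    have hnd : nd = 5 := by omega
    subst hnd
    rw [pvExploreW_val_top R C g r c 5 (by omega)]
    rw [pvRunW]
    norm_num
  | succ n ih =>
    intro g R C r c d nd rest T h1 h5 hm
    by_cases h4 : nd ≤ 4
    · rw [pvRunW]
      rw [if_neg (by omega : ¬ (4 : Int) ≤ nd - 1)]
      rw [pvDirPair_eq nd h1 h4]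
      rw [show nd - 1 + 1 = nd by ring]
      by_cases hg : 0 ≤ r + pvDirs (nd - 1) ∧ r + pvDirs (nd - 1) < R ∧
          0 ≤ c + pvDirs nd ∧ c + pvDirs nd < C ∧
          pvCell g (r + pvDirs (nd - 1)) (c + pvDirs nd) = 1
      · rw [dif_pos hg]
        rw [pvExploreW_val_pos R C g r c nd (by omega) hg]
        rw [pvDfsW_val]
        have hlt := pvNZ_set_lt g (r + pvDirs (nd - 1)) (c + pvDirs nd) hg.1 hg.2.2.1
          (by rw [hg.2.2.2.2]; decide)
        have hA := ih (pvSet g (r + pvDirs (nd - 1)) (c + pvDirs nd) 0) R C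
            (r + pvDirs (nd - 1)) (c + pvDirs nd) nd 1
            ((r, c, d, nd) :: rest) (T ++ [PySem.Int.toStr nd]) (by omega) (by omega) (by omega)
        rw [show (1 : Int) - 1 = 0 by ring] at hA
        rw [hA]
        have hle := (pvExploreW R C (pvSet g (r + pvDirs (nd - 1)) (c + pvDirs nd) 0)
            (r + pvDirs (nd - 1)) (c + pvDirs nd) 1).property
        have hB := ih (pvExploreW R C (pvSet g (r + pvDirs (nd - 1)) (c + pvDirs nd) 0)
              (r + pvDirs (nd - 1)) (c + pvDirs nd) 1).val.1 R C r c d (nd + 1) rest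
            (((T ++ [PySem.Int.toStr nd]) ++ (pvExploreW R C (pvSet g (r + pvDirs (nd - 1)) (c + pvDirs nd) 0)
              (r + pvDirs (nd - 1)) (c + pvDirs nd) 1).val.2) ++ [PySem.Int.toStr (-nd)])
            (by omega) (by omega) (by omega)
        rw [show nd + 1 - 1 = nd by ring] at hB
        rw [hB]
        simp [List.append_assoc]
      · rw [dif_neg hg]
        rw [pvExploreW_val_neg R C g r c nd (by omega) hg]
        have := ih g R C r c d (nd + 1) rest T (by omega) (by omega) (by omega)
        rw [show nd + 1 - 1 = nd by ring] at this
        exact this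
    · have hnd : nd = 5 := by omega
      subst hnd
      rw [pvExploreW_val_top R C g r c 5 (by omega)]
      rw [pvRunW]
      norm_num

theorem pv_sim_dfs (g : List (List Int)) (R C r c d : Int)
    (hr : 0 ≤ r) (hc : 0 ≤ c) (h : pvCell g r c ≠ 0)
    (rest : List (Int × Int × Int × Int)) (T : List String) :
    pvRunW R C (pvSet g r c 0) ((r, c, d, 0) :: rest) (T ++ [PySem.Int.toStr d]) =
      pvRunW R C (pvDfsW R C g r c d hr hc h).val.1 rest
        (T ++ (pvDfsW R C g r c d hr hc h).val.2) := by
  have hs := pv_sim_explore (5 * pvNZ (pvSet g r c 0) + 4) (pvSet g r c 0) R C r c d 1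
    rest (T ++ [PySem.Int.toStr d]) (by omega) (by omega) (by omega)
  rw [show (1 : Int) - 1 = 0 by ring] at hs
  rw [hs, pvDfsW_val]
  simp [List.append_assoc]

-- per island: the fuel-carrying ports agree on the grid they leave behind and the signature
theorem pv_cell_eq (R C : Int) (g : List (List Int)) (rI cI : Nat)
    (h : pvCell g (rI : Int) (cI : Int) ≠ 0) :
    pvDfsA (5 * pvNZ g + 5) R C g (rI : Int) (cI : Int) 0 =
      pvRunB (5 * pvNZ g + 5) R C (pvSet g (rI : Int) (cI : Int) 0)
        [((rI : Int), (cI : Int), 0, 0)] ["0"] := by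
  have hr : (0 : Int) ≤ (rI : Int) := Int.natCast_nonneg rI
  have hc : (0 : Int) ≤ (cI : Int) := Int.natCast_nonneg cI
  have hlt := pvNZ_set_lt g (rI : Int) (cI : Int) hr hc h
  rw [(pv_fuel_A (5 * pvNZ g + 5)).1 R C g (rI : Int) (cI : Int) 0 hr hc h (by omega)]
  rw [pv_fuel_B (5 * pvNZ g + 5) R C (pvSet g (rI : Int) (cI : Int) 0)
    [((rI : Int), (cI : Int), 0, 0)] ["0"] (by simp; omega)]
  have hd := pv_sim_dfs g R C (rI : Int) (cI : Int) 0 hr hc h [] []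
  rw [show ([] : List String) ++ [PySem.Int.toStr 0] = ["0"] by decide] at hd
  rw [pvRunW] at hd
  simp only [List.nil_append] at hd
  rw [hd]

-- ===== VERDICT (by name: the statement is the Claim_ definition above) =====
theorem num_of_distinct_islands_spec : Claim_equal_num_of_distinct_islands := by
  intro grid _ _
  unfold Spec_num_of_distinct_islands
  unfold num_of_distinct_islands num_of_distinct_islands_alt
  by_cases hg : grid = []
  · rw [if_pos hg, if_pos hg]
  · rw [if_neg hg, if_neg hg]
    dsimp only
    have hfun : ∀ (rI : Nat),
        (fun (st2 : List (List Int) × PySem.Set String) (cI : Nat) =>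
          if pvCell st2.1 (rI : Int) (cI : Int) ≠ 0 then
            let res := pvDfsA (5 * pvNZ st2.1 + 5) (grid.length : Int)
              ((grid.headD []).length : Int) st2.1 (rI : Int) (cI : Int) 0
            (res.1, PySem.Set.add st2.2 (PySem.Str.join "" res.2))
          else st2)
        = (fun (st2 : List (List Int) × PySem.Set String) (cI : Nat) =>
          if pvCell st2.1 (rI : Int) (cI : Int) ≠ 0 then
            let res := pvRunB (5 * pvNZ st2.1 + 5) (grid.length : Int)
              ((grid.headD []).length : Int) (pvSet st2.1 (rI : Int) (cI : Int) 0)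
              [((rI : Int), (cI : Int), 0, 0)] ["0"]
            (res.1, PySem.Set.add st2.2 (PySem.Str.join "" res.2))
          else st2) := by
      intro rI
      funext st2 cI
      by_cases h : pvCell st2.1 (rI : Int) (cI : Int) ≠ 0
      · rw [if_pos h, if_pos h]
        dsimp only
        rw [pv_cell_eq (grid.length : Int) ((grid.headD []).length : Int) st2.1 rI cI h]
      · rw [if_neg h, if_neg h]
    have houter :
        (fun (st : List (List Int) × PySem.Set String) (rI : Nat) =>
          (List.range ((st.1.getD rI []).length)).foldl
            (fun (st2 : List (List Int) × PySem.Set String) (cI : Nat) =>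
              if pvCell st2.1 (rI : Int) (cI : Int) ≠ 0 then
                let res := pvDfsA (5 * pvNZ st2.1 + 5) (grid.length : Int)
                  ((grid.headD []).length : Int) st2.1 (rI : Int) (cI : Int) 0
                (res.1, PySem.Set.add st2.2 (PySem.Str.join "" res.2))
              else st2)
            st)
        = (fun (st : List (List Int) × PySem.Set String) (rI : Nat) =>
          (List.range ((st.1.getD rI []).length)).foldl
            (fun (st2 : List (List Int) × PySem.Set String) (cI : Nat) =>
              if pvCell st2.1 (rI : Int) (cI : Int) ≠ 0 then
                let res := pvRunB (5 * pvNZ st2.1 + 5) (grid.length : Int)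
                  ((grid.headD []).length : Int) (pvSet st2.1 (rI : Int) (cI : Int) 0)
                  [((rI : Int), (cI : Int), 0, 0)] ["0"]
                (res.1, PySem.Set.add st2.2 (PySem.Str.join "" res.2))
              else st2)
            st) := by
      funext st rI
      rw [hfun rI]
    rw [houter]
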